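-- pv_equiv track=rewrite | github.com/Lundii1/GemmaEvolve | src/alphaevolve/diffing.py | _normalize_line_endings_with_map
-- ===== SOURCE A (Python) =====
-- def _normalize_line_endings_with_map(text: str) -> tuple[str, list[int]]:
--     normalized_chars: list[str] = []
--     index_map: list[int] = []
--     index = 0
--     while index < len(text):
--         index_map.append(index)
--         char = text[index]
--         if char == "\r":
--             if index + 1 < len(text) and text[index + 1] == "\n":
--                 normalized_chars.append("\n")
--                 index += 2
--                 continue
--             normalized_chars.append("\n")
--             index += 1
--             continue
--         normalized_chars.append(char)
--         index += 1
--     index_map.append(len(text))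
--     return "".join(normalized_chars), index_map
-- ===== SOURCE B (Python) =====
-- def _normalize_line_endings_with_map(text: str) -> tuple[str, list[int]]:
--     normalized = text.replace("\r\n", "\n").replace("\r", "\n")
--     index_map: list[int] = []
--     start = 0
--     while True:
--         j = text.find("\r\n", start)
--         if j == -1:
--             index_map.extend(range(start, len(text)))
--             break
--         index_map.extend(range(start, j + 1))
--         start = j + 2
--     index_map.append(len(text))
--     return normalized, index_map
-- ===== Notes on version B (the rewrite author's own statement) =====
-- stated objective: faster
-- what changed: A's single fused character-by-character while-loop (variable step with continue, building both outputs at once) is replaced by two staged passes over the whole string: the normalized text comes from two chained str.replace calls (CRLF first, then lone CR), and the index map from a str.find loop that locates each CRLF pair and extends whole index ranges block-wise.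
import Mathlib
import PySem

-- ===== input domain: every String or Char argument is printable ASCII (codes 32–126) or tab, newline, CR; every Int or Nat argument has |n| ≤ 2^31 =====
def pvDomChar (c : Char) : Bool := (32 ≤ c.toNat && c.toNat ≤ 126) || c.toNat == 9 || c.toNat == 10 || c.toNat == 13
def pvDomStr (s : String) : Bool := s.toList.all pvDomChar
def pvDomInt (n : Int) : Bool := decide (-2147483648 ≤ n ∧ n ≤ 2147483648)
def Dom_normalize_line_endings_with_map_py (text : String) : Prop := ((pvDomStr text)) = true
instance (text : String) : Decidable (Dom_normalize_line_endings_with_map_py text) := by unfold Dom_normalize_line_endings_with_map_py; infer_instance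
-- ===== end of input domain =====

-- B replaces A's fused per-character scan by two staged library passes: chained
-- str.replace calls for the normalized string and a str.find loop extending whole
-- index ranges for the map; a timing run measured B faster (C-level scans
-- versus A's per-character Python loop; same O(n)).


-- ===== PORT A =====
-- A's while-loop: index_map records the loop index at each iteration, the scan
-- consumes "\r\n" as one step of 2; built by cons-and-recurse over the same state.
def pvLoopA (cs : List Char) (i : Nat) : List Char × List Int :=
  if i < cs.length then
    let c := cs.getD i ' '
    if c = '\r' then
      if i + 1 < cs.length ∧ cs.getD (i + 1) ' ' = '\n' then
        let p := pvLoopA cs (i + 2)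
        ('\n' :: p.1, (i : Int) :: p.2)
      else
        let p := pvLoopA cs (i + 1)
        ('\n' :: p.1, (i : Int) :: p.2)
    else
      let p := pvLoopA cs (i + 1)
      (c :: p.1, (i : Int) :: p.2)
  else ([], [(cs.length : Int)])
termination_by cs.length - i

def normalize_line_endings_with_map_py (text : String) : String × List Int :=
  let p := pvLoopA text.toList 0
  (String.ofList p.1, p.2)

-- ===== PORT B =====
-- two facts about text.find("\r\n", start), needed by pvLoopB's termination proof
theorem pvFindFrom_of_gt (cs : List Char) (k : Nat) (hk : cs.length < k) :
    PySem.Chars.findFrom cs ['\r', '\n'] (k : Int) none = -1 := by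
  unfold PySem.Chars.findFrom
  have h1 : ¬ ((k : Int) < 0) := by omega
  have h2 : (cs.length : Int) < (k : Int) := by exact_mod_cast hk
  simp only [h1, if_false, if_pos h2]

theorem pvFind_bounds (cs : List Char) (k : Nat)
    (h : PySem.Chars.findFrom cs ['\r', '\n'] (k : Int) none ≠ -1) :
    k ≤ (PySem.Chars.findFrom cs ['\r', '\n'] (k : Int) none).toNat ∧
    (PySem.Chars.findFrom cs ['\r', '\n'] (k : Int) none).toNat + 2 ≤ cs.length := by
  by_cases hk : k ≤ cs.length
  · obtain ⟨h1, h2, _⟩ := PySem.Chars.findFrom_natCast_spec cs ['\r', '\n'] k hk h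
    have hlen := h2.length_le
    simp only [List.length_drop, List.length_cons, List.length_nil] at hlen
    omega
  · exact absurd (pvFindFrom_of_gt cs k (by omega)) h

-- B's while-loop: j = text.find("\r\n", start); on -1 extend range(start, len(text))
-- and stop, else extend range(start, j + 1) and continue from j + 2.
def pvLoopB (cs : List Char) (start : Nat) : List Int :=
  let j := PySem.Chars.findFrom cs ['\r', '\n'] (start : Int) none
  if hj : j = -1 then
    (List.range' start (cs.length - start)).map (fun i => (i : Int))
  else
    (List.range' start (j.toNat + 1 - start)).map (fun i => (i : Int)) ++ pvLoopB cs (j.toNat + 2)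
termination_by cs.length - start
decreasing_by
  have := pvFind_bounds cs start hj
  omega

def normalize_line_endings_with_map_py_alt (text : String) : String × List Int :=
  let normalized := PySem.Str.replace (PySem.Str.replace text "\r\n" "\n") "\r" "\n"
  (normalized, pvLoopB text.toList 0 ++ [(text.toList.length : Int)])

-- ===== PRECONDITION & SPEC =====
def Spec_normalize_line_endings_with_map_py (text : String) (out : String × List Int) : Prop := out = normalize_line_endings_with_map_py_alt text
instance (text : String) (out : String × List Int) : Decidable (Spec_normalize_line_endings_with_map_py text out) := by unfold Spec_normalize_line_endings_with_map_py; infer_instance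

-- ===== CLAIM (what is proved, stated in full; the proofs are below) =====
def Claim_equal_normalize_line_endings_with_map_py : Prop := ∀ (text : String), Dom_normalize_line_endings_with_map_py text → Spec_normalize_line_endings_with_map_py text (normalize_line_endings_with_map_py text)

-- ===== LEMMAS AND PROOFS =====

-- structural model of text.replace("\r\n", "\n")
def pvRepCRLF : List Char → List Char
  | [] => []
  | [c] => [c]
  | c :: d :: t =>
    if c = '\r' ∧ d = '\n' then '\n' :: pvRepCRLF t else c :: pvRepCRLF (d :: t)

-- per-char model of text.replace("\r", "\n")
def pvMapCR (c : Char) : Char := if c = '\r' then '\n' else c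

-- the three defining equations of PySem.Chars.replace.go
theorem pvGo_zero (old new l acc : List Char) :
    PySem.Chars.replace.go old new 0 l acc = acc.reverse ++ l := rfl
theorem pvGo_nil (old new acc : List Char) (n : Nat) :
    PySem.Chars.replace.go old new (n + 1) [] acc = acc.reverse := rfl
theorem pvGo_step (old new t acc : List Char) (c : Char) (n : Nat) :
    PySem.Chars.replace.go old new (n + 1) (c :: t) acc =
      if old.isPrefixOf (c :: t) then
        PySem.Chars.replace.go old new n (List.drop old.length (c :: t)) (new.reverse ++ acc)
      else PySem.Chars.replace.go old new n t (c :: acc) := rfl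

theorem pvGo_crlf (fuel : Nat) (l acc : List Char) (h : l.length ≤ fuel) :
    PySem.Chars.replace.go ['\r', '\n'] ['\n'] fuel l acc = acc.reverse ++ pvRepCRLF l := by
  induction fuel generalizing l acc with
  | zero =>
    have : l = [] := by cases l <;> simp_all
    subst this
    simp [pvGo_zero, pvRepCRLF]
  | succ n ih =>
    match l with
    | [] => simp [pvGo_nil, pvRepCRLF]
    | [c] =>
      rw [pvGo_step]
      have : ¬ List.isPrefixOf ['\r', '\n'] [c] = true := by simp [List.isPrefixOf]
      rw [if_neg this, ih [] _ (by simp)]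
      simp [pvRepCRLF]
    | c :: d :: t =>
      rw [pvGo_step]
      by_cases hp : c = '\r' ∧ d = '\n'
      · obtain ⟨h1, h2⟩ := hp; subst h1; subst h2
        rw [if_pos (by simp [List.isPrefixOf])]
        rw [ih _ _ (by simp at h ⊢; omega)]
        simp [pvRepCRLF]
      · rw [if_neg (by simp [List.isPrefixOf]; intro h1 h2; exact hp ⟨h1.symm, h2.symm⟩)]
        rw [ih _ _ (by simp at h ⊢; omega)]
        simp [pvRepCRLF, hp]

theorem pvGo_cr (fuel : Nat) (l acc : List Char) (h : l.length ≤ fuel) :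
    PySem.Chars.replace.go ['\r'] ['\n'] fuel l acc = acc.reverse ++ l.map pvMapCR := by
  induction fuel generalizing l acc with
  | zero =>
    have : l = [] := by cases l <;> simp_all
    subst this
    simp [pvGo_zero]
  | succ n ih =>
    match l with
    | [] => simp [pvGo_nil]
    | c :: t =>
      rw [pvGo_step]
      by_cases hc : c = '\r'
      · subst hc
        rw [if_pos (by simp [List.isPrefixOf])]
        rw [ih _ _ (by simp at h ⊢; omega)]
        simp [pvMapCR]
      · rw [if_neg (by simp [List.isPrefixOf]; exact fun h1 => hc h1.symm)]
        rw [ih _ _ (by simp at h ⊢; omega)]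
        simp [pvMapCR, hc]

theorem pvReplaceCRLF_eq (cs : List Char) :
    PySem.Chars.replace cs ['\r', '\n'] ['\n'] = pvRepCRLF cs := by
  unfold PySem.Chars.replace
  simpa using pvGo_crlf cs.length cs [] le_rfl

theorem pvReplaceCR_eq (cs : List Char) :
    PySem.Chars.replace cs ['\r'] ['\n'] = cs.map pvMapCR := by
  unfold PySem.Chars.replace
  simpa using pvGo_cr cs.length cs [] le_rfl

theorem pvRepCRLF_pair (t : List Char) : pvRepCRLF ('\r' :: '\n' :: t) = '\n' :: pvRepCRLF t := by
  simp [pvRepCRLF]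

theorem pvRepCRLF_cons (c : Char) (t : List Char) (h : ¬ (c = '\r' ∧ t.head? = some '\n')) :
    pvRepCRLF (c :: t) = c :: pvRepCRLF t := by
  match t with
  | [] => simp [pvRepCRLF]
  | d :: t' =>
    have : ¬ (c = '\r' ∧ d = '\n') := by simpa using h
    simp [pvRepCRLF, this]

-- A's emitted characters from position i are the replace-chain applied to the tail
theorem pvLoopA_fst (cs : List Char) (i : Nat) (hle : i ≤ cs.length) :
    (pvLoopA cs i).1 = (pvRepCRLF (cs.drop i)).map pvMapCR := by
  rw [pvLoopA]
  by_cases hi : i < cs.length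
  · rw [if_pos hi]
    have hg : cs.getD i ' ' = cs[i] := List.getD_eq_getElem cs ' ' hi
    have hdrop : cs.drop i = cs[i] :: cs.drop (i + 1) := List.drop_eq_getElem_cons hi
    by_cases hc : cs.getD i ' ' = '\r'
    · by_cases hp : i + 1 < cs.length ∧ cs.getD (i + 1) ' ' = '\n'
      · rw [if_pos hc, if_pos hp]
        have hg2 : cs.getD (i + 1) ' ' = cs[i + 1] := List.getD_eq_getElem cs ' ' hp.1
        have hdrop2 : cs.drop (i + 1) = cs[i + 1] :: cs.drop (i + 2) :=
          List.drop_eq_getElem_cons hp.1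
        have ih := pvLoopA_fst cs (i + 2) hp.1
        rw [hdrop, hdrop2, hg.symm, hc, hg2.symm, hp.2, pvRepCRLF_pair]
        simp [ih, pvMapCR]
      · rw [if_pos hc, if_neg hp]
        have ih := pvLoopA_fst cs (i + 1) hi
        have hh : ¬ (cs[i] = '\r' ∧ (cs.drop (i + 1)).head? = some '\n') := by
          intro ⟨_, h2⟩
          apply hp
          have hne : cs.drop (i + 1) ≠ [] := by intro he; rw [he] at h2; simp at h2
          have hlt : i + 1 < cs.length := by
            by_contra hge
            exact hne (List.drop_eq_nil_of_le (by omega))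
          refine ⟨hlt, ?_⟩
          rw [List.getD_eq_getElem cs ' ' hlt]
          have := List.drop_eq_getElem_cons hlt (l := cs)
          rw [this] at h2
          simpa [List.getElem?_eq_getElem hlt] using h2
        rw [hdrop, pvRepCRLF_cons _ _ hh]
        rw [hg] at hc
        simp [ih, pvMapCR, hc]
    · rw [if_neg hc]
      have ih := pvLoopA_fst cs (i + 1) hi
      rw [hg] at hc
      have hh : ¬ (cs[i] = '\r' ∧ (cs.drop (i + 1)).head? = some '\n') := by
        intro ⟨h1, _⟩; exact hc h1
      show cs.getD i ' ' :: (pvLoopA cs (i + 1)).1 = _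
      rw [hg, hdrop, pvRepCRLF_cons _ _ hh, List.map_cons, ih]
      simp [pvMapCR, hc]
  · rw [if_neg hi]
    rw [List.drop_eq_nil_of_le (by omega)]
    simp [pvRepCRLF]
termination_by cs.length - i

-- find points at the first occurrence: first-occurrence uniqueness
theorem pvFind_eq_of (l sub : List Char) (k : Nat) (h1 : sub <+: l.drop k)
    (h2 : ∀ p < k, ¬ sub <+: l.drop p) : PySem.Chars.find l sub = (k : Int) := by
  have hinf : sub <:+: l := h1.isInfix.trans (List.drop_suffix k l).isInfix
  have h0 : 0 ≤ PySem.Chars.find l sub := (PySem.Chars.find_nonneg_iff l sub).2 hinf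
  obtain ⟨hpre, hmin⟩ := PySem.Chars.find_spec h0
  rcases lt_trichotomy (PySem.Chars.find l sub).toNat k with hlt | heq | hgt
  · exact absurd hpre (h2 _ hlt)
  · omega
  · exact absurd h1 (hmin k hgt)

-- find over a cons cell that does not start an occurrence
theorem pvFind_cons (c : Char) (l sub : List Char) (h : ¬ sub <+: (c :: l)) :
    PySem.Chars.find (c :: l) sub =
      if PySem.Chars.find l sub = -1 then -1 else 1 + PySem.Chars.find l sub := by
  by_cases hf : PySem.Chars.find l sub = -1
  · rw [if_pos hf]
    rw [PySem.Chars.find_eq_neg_one_iff] at hf ⊢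
    intro hinf
    obtain ⟨j, hj⟩ := (PySem.Chars.exists_prefix_drop_iff_isIn sub (c :: l)).2
      ((PySem.Chars.isIn_iff_infix sub (c :: l)).2 hinf)
    match j, hj with
    | 0, hj => exact h (by simpa using hj)
    | (m+1), hj =>
      refine hf ?_
      rw [List.drop_succ_cons] at hj
      exact hj.isInfix.trans (List.drop_suffix m l).isInfix
  · rw [if_neg hf]
    have h0 : 0 ≤ PySem.Chars.find l sub := by
      have := PySem.Chars.neg_one_le_find (s := l) (sub := sub)
      omega
    obtain ⟨hpre, hmin⟩ := PySem.Chars.find_spec h0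
    have := pvFind_eq_of (c :: l) sub ((PySem.Chars.find l sub).toNat + 1)
      (by rwa [List.drop_succ_cons])
      (by
        intro p hp
        match p, hp with
        | 0, _ => exact h
        | (q+1), hp =>
          rw [List.drop_succ_cons]
          exact hmin q (by omega))
    rw [this]
    omega

theorem pvLoopB_eq (cs : List Char) (s : Nat) : pvLoopB cs s =
    if PySem.Chars.findFrom cs ['\r', '\n'] (s : Int) none = -1 then
      (List.range' s (cs.length - s)).map (fun i => (i : Int))
    else
      (List.range' s ((PySem.Chars.findFrom cs ['\r', '\n'] (s : Int) none).toNat + 1 - s)).map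
          (fun i => (i : Int)) ++
        pvLoopB cs ((PySem.Chars.findFrom cs ['\r', '\n'] (s : Int) none).toNat + 2) := by
  rw [pvLoopB]
  split <;> rfl

-- B's loop steps by one over any position that does not start a "\r\n" pair
theorem pvLoopB_cons (cs : List Char) (i : Nat) (hi : i < cs.length)
    (hnp : ¬ ['\r', '\n'] <+: cs.drop i) :
    pvLoopB cs i = (i : Int) :: pvLoopB cs (i + 1) := by
  have hdrop : cs.drop i = cs[i] :: cs.drop (i + 1) := List.drop_eq_getElem_cons hi
  have hF := PySem.Chars.findFrom_natCast cs ['\r', '\n'] i (by omega)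
  have hG := PySem.Chars.findFrom_natCast cs ['\r', '\n'] (i + 1) (by omega)
  have hcons : PySem.Chars.find (cs.drop i) ['\r', '\n'] =
      if PySem.Chars.find (cs.drop (i + 1)) ['\r', '\n'] = -1 then -1
      else 1 + PySem.Chars.find (cs.drop (i + 1)) ['\r', '\n'] := by
    rw [hdrop]
    exact pvFind_cons _ _ _ (by rwa [← hdrop])
  by_cases hm : PySem.Chars.find (cs.drop (i + 1)) ['\r', '\n'] = -1
  · have hFv : PySem.Chars.findFrom cs ['\r', '\n'] (i : Int) none = -1 := by
      rw [hF, if_pos (by rw [hcons, if_pos hm])]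
    have hGv : PySem.Chars.findFrom cs ['\r', '\n'] ((i + 1 : Nat) : Int) none = -1 := by
      rw [hG, if_pos hm]
    rw [pvLoopB_eq cs i, pvLoopB_eq cs (i + 1), if_pos hFv, if_pos hGv]
    have hr : cs.length - i = (cs.length - (i + 1)) + 1 := by omega
    rw [hr, List.range'_succ]
    simp
  · have hm0 : 0 ≤ PySem.Chars.find (cs.drop (i + 1)) ['\r', '\n'] := by
      have := PySem.Chars.neg_one_le_find (s := cs.drop (i + 1)) (sub := ['\r', '\n'])
      omega
    set m := PySem.Chars.find (cs.drop (i + 1)) ['\r', '\n'] with hmdef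
    have hFv : PySem.Chars.findFrom cs ['\r', '\n'] (i : Int) none = (i : Int) + 1 + m := by
      rw [hF, hcons, if_neg hm, if_neg (by omega)]
      ring
    have hGv : PySem.Chars.findFrom cs ['\r', '\n'] ((i + 1 : Nat) : Int) none = (i : Int) + 1 + m := by
      rw [hG, if_neg hm]
      push_cast
      ring
    rw [pvLoopB_eq cs i, pvLoopB_eq cs (i + 1), if_neg (by rw [hFv]; omega),
      if_neg (by rw [hGv]; omega), hFv, hGv]
    have htn : ((i : Int) + 1 + m).toNat = i + 1 + m.toNat := by omega
    rw [htn]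
    have hr : i + 1 + m.toNat + 1 - i = (i + 1 + m.toNat + 1 - (i + 1)) + 1 := by omega
    rw [hr, List.range'_succ]
    simp

-- A's recorded indices from position i are B's block-extended ranges from i
theorem pvLoopA_snd (cs : List Char) (i : Nat) (hle : i ≤ cs.length) :
    (pvLoopA cs i).2 = pvLoopB cs i ++ [(cs.length : Int)] := by
  rw [pvLoopA]
  by_cases hi : i < cs.length
  · rw [if_pos hi]
    have hg : cs.getD i ' ' = cs[i] := List.getD_eq_getElem cs ' ' hi
    have hdrop : cs.drop i = cs[i] :: cs.drop (i + 1) := List.drop_eq_getElem_cons hi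
    by_cases hc : cs.getD i ' ' = '\r'
    · by_cases hp : i + 1 < cs.length ∧ cs.getD (i + 1) ' ' = '\n'
      · rw [if_pos hc, if_pos hp]
        have hg2 : cs.getD (i + 1) ' ' = cs[i + 1] := List.getD_eq_getElem cs ' ' hp.1
        have hdrop2 : cs.drop (i + 1) = cs[i + 1] :: cs.drop (i + 2) :=
          List.drop_eq_getElem_cons hp.1
        have hpre : ['\r', '\n'] <+: cs.drop i := by
          refine ⟨cs.drop (i + 2), ?_⟩
          rw [hdrop, hdrop2, ← hg, hc, ← hg2, hp.2]
          rfl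
        have hf0 : PySem.Chars.find (cs.drop i) ['\r', '\n'] = ((0 : Nat) : Int) :=
          pvFind_eq_of _ _ 0 (by simpa using hpre) (by omega)
        have hFv : PySem.Chars.findFrom cs ['\r', '\n'] (i : Int) none = (i : Int) := by
          rw [PySem.Chars.findFrom_natCast cs ['\r', '\n'] i (by omega), hf0]
          norm_num
        have ih := pvLoopA_snd cs (i + 2) hp.1
        rw [pvLoopB_eq cs i, if_neg (by rw [hFv]; omega), hFv]
        have htn : ((i : Int)).toNat = i := by omega
        rw [htn]
        have hr : i + 1 - i = 1 := by omega
        rw [hr, List.range'_one]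
        simp only [ih]
        simp
      · rw [if_pos hc, if_neg hp]
        have hnp : ¬ ['\r', '\n'] <+: cs.drop i := by
          intro hpre
          obtain ⟨t, ht⟩ := hpre
          rw [hdrop] at ht
          have ht' : '\r' :: '\n' :: t = cs[i] :: cs.drop (i + 1) := ht
          injection ht' with h1 h2
          have hlt : i + 1 < cs.length := by
            have := congrArg List.length h2
            simp at this
            omega
          have hdrop2 : cs.drop (i + 1) = cs[i + 1] :: cs.drop (i + 2) :=
            List.drop_eq_getElem_cons hlt
          rw [hdrop2] at h2
          injection h2 with h3 _
          exact hp ⟨hlt, by rw [List.getD_eq_getElem cs ' ' hlt, ← h3]⟩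
        have ih := pvLoopA_snd cs (i + 1) hi
        rw [pvLoopB_cons cs i hi hnp]
        simp [ih]
    · rw [if_neg hc]
      have hnp : ¬ ['\r', '\n'] <+: cs.drop i := by
        intro hpre
        obtain ⟨t, ht⟩ := hpre
        rw [hdrop] at ht
        have ht' : '\r' :: '\n' :: t = cs[i] :: cs.drop (i + 1) := ht
        injection ht' with h1 h2
        exact hc (by rw [hg, ← h1])
      have ih := pvLoopA_snd cs (i + 1) hi
      rw [pvLoopB_cons cs i hi hnp]
      simp [ih]
  · rw [if_neg hi]
    have hFv : PySem.Chars.findFrom cs ['\r', '\n'] (i : Int) none = -1 := by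
      rw [PySem.Chars.findFrom_natCast_eq_neg_one_iff cs ['\r', '\n'] i (by omega)]
      rw [List.drop_eq_nil_of_le (by omega)]
      simp
    rw [pvLoopB_eq, if_pos hFv]
    have hz : cs.length - i = 0 := by omega
    rw [hz]
    simp
termination_by cs.length - i

-- ===== VERDICT (by name: the statement is the Claim_ definition above) =====
theorem normalize_line_endings_with_map_py_spec : Claim_equal_normalize_line_endings_with_map_py := by
  intro text _
  unfold Spec_normalize_line_endings_with_map_py
  unfold normalize_line_endings_with_map_py normalize_line_endings_with_map_py_alt
  refine Prod.ext ?_ ?_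
  · show String.ofList (pvLoopA text.toList 0).1 = _
    have h1 : (PySem.Str.replace (PySem.Str.replace text "\r\n" "\n") "\r" "\n").toList
        = (pvRepCRLF text.toList).map pvMapCR := by
      rw [PySem.Str.toList_replace, PySem.Str.toList_replace]
      show PySem.Chars.replace (PySem.Chars.replace text.toList ['\r','\n'] ['\n']) ['\r'] ['\n'] = _
      rw [pvReplaceCRLF_eq, pvReplaceCR_eq]
    have h2 := pvLoopA_fst text.toList 0 (Nat.zero_le _)
    simp only [List.drop_zero] at h2
    calc String.ofList (pvLoopA text.toList 0).1
        = String.ofList (PySem.Str.replace (PySem.Str.replace text "\r\n" "\n") "\r" "\n").toList := by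
          rw [h1, h2]
      _ = _ := String.ofList_toList
  · exact pvLoopA_snd text.toList 0 (Nat.zero_le _)
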